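-- pv_equiv track=rewrite | github.com/phatakshaunak/scaler_academy | DSA_Problem_Solving/String_Manipulation/rotate_string.py | solve
-- ===== SOURCE A (Python) =====
-- def solve(A, B):
--     A = [i for i in A]
--
--     # Accounting for when B > len(A)
--     nrot = B % len(A)
--
--     def rev(l,r,arr):
--
--         while l < r:
--             arr[l], arr[r] = arr[r], arr[l]
--
--             l += 1
--             r -= 1
--
--     rev(0, len(A)-1, A)
--
--     rev(0, nrot-1, A)
--
--     rev(nrot, len(A)-1, A)
--
--     return ''.join(A)
-- ===== SOURCE B (Python) =====
-- def solve(A, B):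
--     nrot = B % len(A)
--     cut = len(A) - nrot
--     return A[cut:] + A[:cut]
-- ===== Notes on version B (the rewrite author's own statement) =====
-- stated objective: simpler
-- what changed: Replaced the three in-place two-pointer reversal passes over a char list with the closed-form slice concatenation A[len(A)-B%len(A):] + A[:len(A)-B%len(A)].
import Mathlib
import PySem

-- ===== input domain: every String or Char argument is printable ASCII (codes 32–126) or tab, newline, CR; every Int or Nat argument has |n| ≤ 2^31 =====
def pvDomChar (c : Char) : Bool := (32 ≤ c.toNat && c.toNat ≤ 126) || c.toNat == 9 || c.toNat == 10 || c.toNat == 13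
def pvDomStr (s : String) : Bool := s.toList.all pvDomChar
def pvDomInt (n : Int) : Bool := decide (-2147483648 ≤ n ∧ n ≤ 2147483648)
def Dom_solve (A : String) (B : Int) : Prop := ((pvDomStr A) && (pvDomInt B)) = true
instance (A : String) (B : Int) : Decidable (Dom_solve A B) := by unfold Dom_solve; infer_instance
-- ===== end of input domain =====

-- B replaces A's three in-place two-pointer reversal passes with one closed-form
-- slice concatenation (simpler). A mutates only its local list copy, so the
-- equivalence of return values is the whole behaviour.


-- ===== PORT A =====
-- while l < r: arr[l], arr[r] = arr[r], arr[l]; l += 1; r -= 1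
-- (in solve's three calls the loop body only ever runs with 0 ≤ l < r < len(arr),
--  so .toNat / .getD are exact there)
def pvRevLoop (l r : Int) (arr : List Char) : List Char :=
  if l < r then
    pvRevLoop (l + 1) (r - 1)
      ((arr.set l.toNat (arr.getD r.toNat ' ')).set r.toNat (arr.getD l.toNat ' '))
  else arr
termination_by (r - l).toNat
decreasing_by omega

def solve (A : String) (B : Int) : String :=
  let cs := A.toList                                   -- A = [i for i in A]
  let nrot := PySem.Int.mod B (cs.length : Int)        -- nrot = B % len(A)
  let a1 := pvRevLoop 0 ((cs.length : Int) - 1) cs     -- rev(0, len(A)-1, A)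
  let a2 := pvRevLoop 0 (nrot - 1) a1                  -- rev(0, nrot-1, A)
  let a3 := pvRevLoop nrot ((cs.length : Int) - 1) a2  -- rev(nrot, len(A)-1, A)
  String.ofList a3                                     -- ''.join(A)

-- ===== PORT B =====
def solve_alt (A : String) (B : Int) : String :=
  let cs := A.toList
  let nrot := PySem.Int.mod B (cs.length : Int)        -- nrot = B % len(A)
  let cut := (cs.length : Int) - nrot                  -- cut = len(A) - nrot
  String.ofList (PySem.List.slice cs (some cut) none ++ PySem.List.slice cs none (some cut))
                                                       -- A[cut:] + A[:cut]

-- ===== PRECONDITION & SPEC =====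
-- Pre_ excludes only the empty string, on which A raises ZeroDivisionError at 'B % len(A)'
-- (and B raises it there too).
def Pre_solve (A : String) (B : Int) : Prop := A ≠ ""
instance (A : String) (B : Int) : Decidable (Pre_solve A B) := by unfold Pre_solve; infer_instance
def pvWitness_solve : String × Int := ("ab", 1)

def Spec_solve (A : String) (B : Int) (out : String) : Prop := out = solve_alt A B
instance (A : String) (B : Int) (out : String) : Decidable (Spec_solve A B out) := by unfold Spec_solve; infer_instance

-- ===== CLAIM (what is proved, stated in full; the proofs are below) =====
def Claim_equal_solve : Prop := ∀ (A : String) (B : Int), Dom_solve A B → Pre_solve A B → Spec_solve A B (solve A B)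

-- ===== LEMMAS AND PROOFS =====

theorem getD_mid (u v : List Char) (c d : Char) : (u ++ c :: v).getD u.length d = c := by
  simp [List.getD_eq_getElem?_getD]

theorem set_mid (u v : List Char) (c c' : Char) : (u ++ c :: v).set u.length c' = u ++ c' :: v := by
  induction u with
  | nil => simp
  | cons a u ih => simp [ih]

-- the two-pointer loop reverses exactly the segment it is pointed at
theorem pvRevLoop_seg (mid pre post : List Char) :
    pvRevLoop (pre.length : Int) ((pre.length : Int) + (mid.length : Int) - 1) (pre ++ mid ++ post)
      = pre ++ mid.reverse ++ post := by
  induction hn : mid.length using Nat.strong_induction_on generalizing mid pre post with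
  | _ n ih =>
  subst hn
  by_cases h2 : mid.length ≤ 1
  · rw [pvRevLoop]
    rw [if_neg (by omega)]
    rcases mid with _ | ⟨x, _ | ⟨z, t⟩⟩
    · simp
    · simp
    · simp at h2
  · -- mid = x :: mid' ++ [y]
    obtain ⟨x, t, rfl⟩ := List.exists_cons_of_ne_nil (show mid ≠ [] by intro h; subst h; simp at h2)
    have ht : t ≠ [] := by intro h; simp [h] at h2
    obtain ⟨mid', y, rfl⟩ : ∃ m y, t = m ++ [y] := ⟨t.dropLast, t.getLast ht, (List.dropLast_append_getLast ht).symm⟩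
    rw [pvRevLoop]
    rw [if_pos (by simp; omega)]
    have e1 : ((pre.length : Int)).toNat = pre.length := by omega
    have e2 : (((pre.length : Int) + ((x :: (mid' ++ [y])).length : Int) - 1)).toNat
        = (pre ++ x :: mid').length := by simp; omega
    rw [e1, e2]
    have harr : pre ++ (x :: (mid' ++ [y])) ++ post = (pre ++ x :: mid') ++ y :: post := by simp
    have hget_r : (pre ++ (x :: (mid' ++ [y])) ++ post).getD (pre ++ x :: mid').length ' ' = y := by
      rw [harr, getD_mid]
    have hget_l : (pre ++ (x :: (mid' ++ [y])) ++ post).getD pre.length ' ' = x := by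
      have : pre ++ (x :: (mid' ++ [y])) ++ post = pre ++ x :: (mid' ++ [y] ++ post) := by simp
      rw [this, getD_mid]
    rw [hget_r, hget_l]
    have hset1 : (pre ++ (x :: (mid' ++ [y])) ++ post).set pre.length y
        = pre ++ y :: (mid' ++ [y] ++ post) := by
      have : pre ++ (x :: (mid' ++ [y])) ++ post = pre ++ x :: (mid' ++ [y] ++ post) := by simp
      rw [this, set_mid]
    rw [hset1]
    have hset2 : (pre ++ y :: (mid' ++ [y] ++ post)).set (pre ++ x :: mid').length x
        = (pre ++ [y]) ++ mid' ++ (x :: post) := by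
      have : pre ++ y :: (mid' ++ [y] ++ post) = (pre ++ y :: mid') ++ y :: post := by simp
      rw [this]
      have hlen : (pre ++ x :: mid').length = (pre ++ y :: mid').length := by simp
      rw [hlen, set_mid]; simp
    rw [hset2]
    have e3 : (pre.length : Int) + 1 = ((pre ++ [y]).length : Int) := by simp
    have e4 : (pre.length : Int) + ((x :: (mid' ++ [y])).length : Int) - 1 - 1
        = ((pre ++ [y]).length : Int) + (mid'.length : Int) - 1 := by simp; omega
    rw [e3, e4, ih mid'.length (by simp) mid' (pre ++ [y]) (x :: post) rfl]
    simp

theorem solve_spec' (A : String) (B : Int) (h : A ≠ "") : solve A B = solve_alt A B := by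
  simp only [solve, solve_alt]
  have hne : A.toList ≠ [] := fun hnil => h (by
    have := congrArg String.ofList hnil
    simpa using this)
  set cs := A.toList with hcs
  have hn : 0 < cs.length := List.length_pos_iff.mpr hne
  have h0 : (0:Int) < (cs.length:Int) := by exact_mod_cast hn
  have hnn := PySem.Int.mod_nonneg B (b := (cs.length:Int)) h0
  have hlt := PySem.Int.mod_lt B (b := (cs.length:Int)) h0
  set k := (PySem.Int.mod B (cs.length:Int)).toNat with hkdef
  have hknr : PySem.Int.mod B (cs.length:Int) = (k:Int) := by omega
  have hkn : k < cs.length := by omega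
  rw [hknr]
  have s1 : pvRevLoop 0 ((cs.length:Int) - 1) cs = cs.reverse := by
    have := pvRevLoop_seg cs [] []
    simpa using this
  have s2 : pvRevLoop 0 ((k:Int) - 1) cs.reverse
      = (cs.reverse.take k).reverse ++ cs.reverse.drop k := by
    have := pvRevLoop_seg (cs.reverse.take k) [] (cs.reverse.drop k)
    have hlen : (cs.reverse.take k).length = k := by simp; omega
    simpa [hlen] using this
  have s3 : pvRevLoop ((k:Int)) ((cs.length:Int) - 1)
        ((cs.reverse.take k).reverse ++ cs.reverse.drop k)
      = (cs.reverse.take k).reverse ++ (cs.reverse.drop k).reverse := by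
    have := pvRevLoop_seg (cs.reverse.drop k) ((cs.reverse.take k).reverse) []
    have hl1 : ((cs.reverse.take k).reverse).length = k := by simp; omega
    have hl2 : ((cs.reverse.drop k)).length = cs.length - k := by simp
    have e : ((k:Int)) + ((cs.length - k : Nat):Int) - 1 = (cs.length:Int) - 1 := by omega
    simpa [hl1, hl2, e] using this
  rw [s1, s2, s3]
  have ecut : (cs.length:Int) - (k:Int) = ((cs.length - k : Nat):Int) := by omega
  rw [ecut, PySem.List.slice_from_natCast, PySem.List.slice_to_natCast]
  rw [List.take_reverse, List.drop_reverse, List.reverse_reverse, List.reverse_reverse]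

-- ===== VERDICT (by name: the statement is the Claim_ definition above) =====
theorem solve_spec : Claim_equal_solve := by
  intro A B _ hPre
  exact solve_spec' A B hPre
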